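-- pv_equiv track=rewrite | github.com/keenon/AddBiomechanics | server/app/reactive_s3/reactive_s3_index.py | makeTopicPubSubSafe
-- ===== SOURCE A (Python) =====
-- def makeTopicPubSubSafe(path: str) -> str:
--     MAX_TOPIC_LEN = 80
--     if (len(path) > MAX_TOPIC_LEN):
--         segments = path.split("/")
--         if (len(segments[0]) > MAX_TOPIC_LEN):
--             return segments[0][0:MAX_TOPIC_LEN]
--         reconstructed = ''
--         segmentCursor = 0
--         while segmentCursor < len(segments):
--             proposedNext = reconstructed
--             if segmentCursor > 0:
--                 proposedNext += '/'
--             proposedNext += segments[segmentCursor]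
--             segmentCursor += 1
--
--             if len(proposedNext) < MAX_TOPIC_LEN:
--                 reconstructed = proposedNext
--             else:
--                 break
--         return reconstructed
--     return path
-- ===== SOURCE B (Python) =====
-- def makeTopicPubSubSafe(path: str) -> str:
--     MAX_TOPIC_LEN = 80
--     if len(path) <= MAX_TOPIC_LEN:
--         return path
--     segments = path.split("/")
--     if len(segments[0]) > MAX_TOPIC_LEN:
--         return segments[0][:MAX_TOPIC_LEN]
--     # count leading segments whose joined length stays < MAX, then join once
--     total = -1  # joined length of first k segments is sum(len)+k-1
--     k = 0
--     for seg in segments: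
--         total += 1 + len(seg)
--         if total >= MAX_TOPIC_LEN:
--             break
--         k += 1
--     return "/".join(segments[:k])
-- ===== Notes on version B (the rewrite author's own statement) =====
-- stated objective: simpler
-- what changed: B replaces the while-loop that rebuilds the candidate string on every iteration with an integer running-total scan that counts how many leading segments fit, followed by a single join of that prefix.
import Mathlib
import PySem

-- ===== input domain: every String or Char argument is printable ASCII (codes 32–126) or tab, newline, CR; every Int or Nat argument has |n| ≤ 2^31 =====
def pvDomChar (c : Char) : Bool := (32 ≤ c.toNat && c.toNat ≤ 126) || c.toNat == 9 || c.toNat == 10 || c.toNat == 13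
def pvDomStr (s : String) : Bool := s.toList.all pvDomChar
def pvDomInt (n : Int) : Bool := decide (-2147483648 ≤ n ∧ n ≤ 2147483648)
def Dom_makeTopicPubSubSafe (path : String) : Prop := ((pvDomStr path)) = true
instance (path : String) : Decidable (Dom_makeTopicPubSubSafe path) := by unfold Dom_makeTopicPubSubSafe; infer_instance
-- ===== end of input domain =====

-- B replaces A's string-rebuilding while-loop by an integer running-total count of
-- fitting segments followed by a single join (objective: simpler).

-- ===== PORT A =====
-- while segmentCursor < len(segments): rebuild the candidate string, keep it if < 80
def pvLoopA (segments : List (List Char)) (cursor : Nat) (reconstructed : List Char) :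
    List Char :=
  if h : cursor < segments.length then
    let proposedNext :=
      (if cursor > 0 then reconstructed ++ ['/'] else reconstructed) ++ segments[cursor]
    if proposedNext.length < 80 then
      pvLoopA segments (cursor + 1) proposedNext
    else
      reconstructed
  else
    reconstructed
termination_by segments.length - cursor

def makeTopicPubSubSafe (path : String) : String :=
  if PySem.Str.len path > 80 then
    let segments := PySem.Chars.splitOn path.toList ['/']
    if (PySem.List.pyGetD segments 0 []).length > 80 then
      String.ofList (PySem.List.slice (PySem.List.pyGetD segments 0 []) (some 0) (some 80))
    else
      String.ofList (pvLoopA segments 0 [])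
  else
    path

-- ===== PORT B =====
-- for seg in segments: total += 1 + len(seg); break when total >= 80 else k += 1
def pvCountFit (segs : List (List Char)) (total : Int) (k : Nat) : Nat :=
  match segs with
  | [] => k
  | s :: rest =>
    let total' := total + 1 + (s.length : Int)
    if total' ≥ 80 then k else pvCountFit rest total' (k + 1)

def makeTopicPubSubSafe_alt (path : String) : String :=
  if PySem.Str.len path ≤ 80 then
    path
  else
    let segments := PySem.Chars.splitOn path.toList ['/']
    if (PySem.List.pyGetD segments 0 []).length > 80 then
      String.ofList (PySem.List.slice (PySem.List.pyGetD segments 0 []) none (some 80))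
    else
      String.ofList
        (PySem.Chars.join ['/'] (segments.take (pvCountFit segments (-1) 0)))

-- ===== PRECONDITION & SPEC =====
def Spec_makeTopicPubSubSafe (path : String) (out : String) : Prop := out = makeTopicPubSubSafe_alt path
instance (path : String) (out : String) : Decidable (Spec_makeTopicPubSubSafe path out) := by unfold Spec_makeTopicPubSubSafe; infer_instance

-- ===== CLAIM (what is proved, stated in full; the proofs are below) =====
def Claim_equal_makeTopicPubSubSafe : Prop := ∀ (path : String), Dom_makeTopicPubSubSafe path → Spec_makeTopicPubSubSafe path (makeTopicPubSubSafe path)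

-- ===== LEMMAS AND PROOFS =====

-- proof helper: the suffix A's loop appends after the first segment has been accepted
def pvExtra (rest : List (List Char)) (total : Int) : List Char :=
  match rest with
  | [] => []
  | s :: rest' =>
    if total + 1 + (s.length : Int) < 80 then
      ('/' :: s) ++ pvExtra rest' (total + 1 + (s.length : Int))
    else
      []

-- proof helper: structural count of additional fitting segments
def pvFit (rest : List (List Char)) (total : Int) : Nat :=
  match rest with
  | [] => 0
  | s :: rest' =>
    if total + 1 + (s.length : Int) ≥ 80 then 0
    else 1 + pvFit rest' (total + 1 + (s.length : Int))

lemma pvCountFit_eq (segs : List (List Char)) (total : Int) (k : Nat) :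
    pvCountFit segs total k = k + pvFit segs total := by
  induction segs generalizing total k with
  | nil => simp [pvCountFit, pvFit]
  | cons s rest ih =>
    simp only [pvCountFit, pvFit]
    split_ifs with h
    · simp
    · rw [ih]; omega

-- A's loop from cursor ≥ 1, written on the dropped suffix
def pvLoopTail (rest : List (List Char)) (r : List Char) : List Char :=
  match rest with
  | [] => r
  | s :: rest' =>
    let p := (r ++ ['/']) ++ s
    if p.length < 80 then pvLoopTail rest' p else r

lemma pvLoopA_eq_tail (segments : List (List Char)) (cursor : Nat) (r : List Char)
    (hc : 1 ≤ cursor) :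
    pvLoopA segments cursor r = pvLoopTail (segments.drop cursor) r := by
  generalize hfuel : segments.length - cursor = fuel
  induction fuel generalizing cursor r with
  | zero =>
    rw [pvLoopA]
    have hge : ¬ cursor < segments.length := by omega
    have hdrop : segments.drop cursor = [] := List.drop_eq_nil_of_le (by omega)
    simp [hge, hdrop, pvLoopTail]
  | succ n ih =>
    have h : cursor < segments.length := by omega
    rw [pvLoopA]
    have hdrop : segments.drop cursor = segments[cursor] :: segments.drop (cursor + 1) :=
      List.drop_eq_getElem_cons h
    have hpos : cursor > 0 := hc
    rw [hdrop, pvLoopTail]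
    simp only [h, dif_pos, if_pos hpos]
    by_cases hp : ((r ++ ['/']) ++ segments[cursor]).length < 80
    · rw [if_pos hp, if_pos hp, ih (cursor + 1) _ (by omega) (by omega)]
    · rw [if_neg hp, if_neg hp]

lemma pvLoopTail_spec (rest : List (List Char)) (r : List Char) :
    pvLoopTail rest r = r ++ pvExtra rest (r.length : Int) := by
  induction rest generalizing r with
  | nil => simp [pvLoopTail, pvExtra]
  | cons s rest' ih =>
    simp only [pvLoopTail, pvExtra]
    have hlen : ((r ++ ['/']) ++ s).length = r.length + 1 + s.length := by
      simp; omega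
    by_cases h : (r.length : Int) + 1 + (s.length : Int) < 80
    · have h' : ((r ++ ['/']) ++ s).length < 80 := by omega
      rw [if_pos h', if_pos h, ih]
      have hcast : (((r ++ ['/']) ++ s).length : Int) = (r.length : Int) + 1 + (s.length : Int) := by
        rw [hlen]; push_cast; ring
      rw [hcast]
      simp
    · have h' : ¬ ((r ++ ['/']) ++ s).length < 80 := by omega
      rw [if_neg h', if_neg h]
      simp

lemma pvJoin_take_fit (rest : List (List Char)) (s : List Char) (total : Int) :
    PySem.Chars.join ['/'] (s :: rest.take (pvFit rest total)) =
      s ++ pvExtra rest total := by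
  induction rest generalizing s total with
  | nil => simp [pvFit, pvExtra, PySem.Chars.join_singleton]
  | cons s' rest' ih =>
    simp only [pvFit, pvExtra]
    by_cases h : total + 1 + (s'.length : Int) < 80
    · rw [if_neg (by omega), if_pos h]
      rw [show 1 + pvFit rest' (total + 1 + (s'.length : Int)) =
            (pvFit rest' (total + 1 + (s'.length : Int))) + 1 by omega]
      rw [List.take_succ_cons, PySem.Chars.join_cons_cons, ih]
      simp
    · rw [if_pos (by omega), if_neg h]
      simp [PySem.Chars.join_singleton]

lemma pvMain (segments : List (List Char))
    (hguard : ¬ (PySem.List.pyGetD segments 0 []).length > 80) :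
    pvLoopA segments 0 [] =
      PySem.Chars.join ['/'] (segments.take (pvCountFit segments (-1) 0)) := by
  cases segments with
  | nil => simp [pvLoopA, pvCountFit, PySem.Chars.join_nil]
  | cons s0 rest =>
    have hget : PySem.List.pyGetD (s0 :: rest) 0 [] = s0 := by
      simp [PySem.List.pyGetD, PySem.List.pyGet?, PySem.List.pyIdx?]
    rw [hget] at hguard
    rw [pvLoopA]
    simp only [List.length_cons, Nat.zero_lt_succ, dif_pos, List.getElem_cons_zero]
    norm_num
    rw [pvCountFit]
    simp only [show (-1 : Int) + 1 + (s0.length : Int) = (s0.length : Int) by ring]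
    by_cases h80 : (s0.length : Int) ≥ 80
    · rw [if_neg (by omega : ¬ s0.length < 80), if_pos h80]
      simp [PySem.Chars.join_nil]
    · rw [if_pos (by omega : s0.length < 80), if_neg h80]
      rw [pvLoopA_eq_tail (s0 :: rest) 1 s0 (by omega)]
      rw [List.drop_one, List.tail_cons]
      rw [pvLoopTail_spec, pvCountFit_eq]
      rw [show (0:Nat) + 1 + pvFit rest (s0.length : Int) =
            (1 + pvFit rest (s0.length : Int)) by omega]
      rw [show (1 + pvFit rest (s0.length : Int)) = pvFit rest (s0.length : Int) + 1 by omega]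
      rw [List.take_succ_cons, pvJoin_take_fit]

lemma pvSlice_eq (s : List Char) :
    PySem.List.slice s (some (0:Int)) (some (80:Int)) =
      PySem.List.slice s none (some (80:Int)) := by
  rw [PySem.List.slice_to s (by omega : (0:Int) ≤ 80),
    PySem.List.slice_toNat s (by omega) (by omega)]
  simp

-- ===== VERDICT (by name: the statement is the Claim_ definition above) =====
theorem makeTopicPubSubSafe_spec : Claim_equal_makeTopicPubSubSafe := by
  intro path _
  unfold Spec_makeTopicPubSubSafe
  simp only [makeTopicPubSubSafe, makeTopicPubSubSafe_alt]
  by_cases hlen : PySem.Str.len path > 80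
  · rw [if_pos hlen, if_neg (show ¬ PySem.Str.len path ≤ 80 by omega)]
    by_cases hguard : (PySem.List.pyGetD (PySem.Chars.splitOn path.toList ['/']) 0 []).length > 80
    · rw [if_pos hguard, if_pos hguard, pvSlice_eq]
    · rw [if_neg hguard, if_neg hguard, pvMain _ hguard]
  · rw [if_neg hlen, if_pos (show PySem.Str.len path ≤ 80 by omega)]
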